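-- pv_equiv track=rewrite | github.com/DzikowskiW/AoC | aoc2022/17.py | visualise
-- ===== SOURCE A (Python) =====
-- def visualise(miny, maxy, stack):
--     output = ''
--     for y in range(maxy,miny-1,-1):
--         line = ''
--         for x in range(0,7):
--             if (x,y) in stack:
--                 line += '#'
--             else:
--                 line += '.'
--         output += line
--     return output
-- ===== SOURCE B (Python) =====
-- def visualise(miny, maxy, stack):
--     height = maxy - miny + 1
--     canvas = ['.'] * (height * 7)
--     for (x, y) in stack:
--         if miny <= y <= maxy and 0 <= x < 7:
--             canvas[(maxy - y) * 7 + x] = '#'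
--     return ''.join(canvas)
-- ===== Notes on version B (the rewrite author's own statement) =====
-- stated objective: alternative
-- what changed: Instead of scanning every grid cell and probing the stack with a membership test per cell, B allocates a flat '.'-canvas once and scatters only the in-range stack points onto it, then joins.
import Mathlib
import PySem

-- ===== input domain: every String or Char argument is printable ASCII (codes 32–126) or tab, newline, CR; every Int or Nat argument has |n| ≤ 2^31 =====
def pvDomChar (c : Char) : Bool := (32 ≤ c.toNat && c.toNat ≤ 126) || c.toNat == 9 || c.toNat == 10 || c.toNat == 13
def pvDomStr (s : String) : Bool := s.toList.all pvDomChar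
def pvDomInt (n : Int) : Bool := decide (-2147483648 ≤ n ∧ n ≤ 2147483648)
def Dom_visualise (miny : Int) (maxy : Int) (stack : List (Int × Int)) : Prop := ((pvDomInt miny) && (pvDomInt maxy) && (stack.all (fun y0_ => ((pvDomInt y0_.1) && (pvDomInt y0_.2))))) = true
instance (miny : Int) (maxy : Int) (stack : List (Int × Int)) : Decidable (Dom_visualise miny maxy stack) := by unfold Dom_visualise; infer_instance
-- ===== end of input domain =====

-- B builds a flat '.'-canvas once and scatters the in-range stack points onto it,
-- instead of scanning every cell and probing the stack with a membership test.

-- ===== PORT A =====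
def visualise (miny : Int) (maxy : Int) (stack : List (Int × Int)) : String :=
  (PySem.List.pyRange maxy (miny - 1) (-1)).foldl (fun output y =>
    let line := (PySem.List.pyRange 0 7 1).foldl (fun line x =>
      line ++ (if (x, y) ∈ stack then "#" else ".")) ""
    output ++ line) ""

-- ===== PORT B =====
def visualise_alt (miny : Int) (maxy : Int) (stack : List (Int × Int)) : String :=
  let canvas := List.replicate ((maxy - miny + 1) * 7).toNat '.'
  String.ofList (stack.foldl (fun c p =>
    if miny ≤ p.2 ∧ p.2 ≤ maxy ∧ 0 ≤ p.1 ∧ p.1 < 7 then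
      c.set ((maxy - p.2) * 7 + p.1).toNat '#'
    else c) canvas)

-- ===== PRECONDITION & SPEC =====
def Spec_visualise (miny : Int) (maxy : Int) (stack : List (Int × Int)) (out : String) : Prop := out = visualise_alt miny maxy stack
instance (miny : Int) (maxy : Int) (stack : List (Int × Int)) (out : String) : Decidable (Spec_visualise miny maxy stack out) := by unfold Spec_visualise; infer_instance

-- ===== CLAIM (what is proved, stated in full; the proofs are below) =====
def Claim_equal_visualise : Prop := ∀ (miny : Int) (maxy : Int) (stack : List (Int × Int)), Dom_visualise miny maxy stack → Spec_visualise miny maxy stack (visualise miny maxy stack)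

-- ===== LEMMAS AND PROOFS =====

-- one rendered row of A, as a char list
def pvRow (stack : List (Int × Int)) (y : Int) : List Char :=
  [if (0, y) ∈ stack then '#' else '.', if (1, y) ∈ stack then '#' else '.',
   if (2, y) ∈ stack then '#' else '.', if (3, y) ∈ stack then '#' else '.',
   if (4, y) ∈ stack then '#' else '.', if (5, y) ∈ stack then '#' else '.',
   if (6, y) ∈ stack then '#' else '.']

-- n rows starting at y and going down
def pvRows (stack : List (Int × Int)) : Int → Nat → List Char
  | _, 0 => []
  | y, n + 1 => pvRow stack y ++ pvRows stack (y - 1) n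

theorem pvRows_length (stack : List (Int × Int)) (y : Int) (n : Nat) :
    (pvRows stack y n).length = n * 7 := by
  induction n generalizing y with
  | zero => rfl
  | succ n ih => simp [pvRows, pvRow, ih]; omega

theorem pvRow_get (stack : List (Int × Int)) (y : Int) (r : Nat) (hr : r < 7) :
    (pvRow stack y)[r]? = some (if ((r : Int), y) ∈ stack then '#' else '.') := by
  interval_cases r <;> simp [pvRow]

theorem pvRows_get (stack : List (Int × Int)) (n : Nat) :
    ∀ (y : Int) (q r : Nat), q < n → r < 7 →
    (pvRows stack y n)[q * 7 + r]? =
      some (if ((r : Int), y - (q : Int)) ∈ stack then '#' else '.') := by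
  induction n with
  | zero => omega
  | succ n ih =>
    intro y q r hq hr
    match q with
    | 0 =>
      rw [pvRows, List.getElem?_append_left (by simp [pvRow]; omega)]
      simpa using pvRow_get stack y r hr
    | q + 1 =>
      rw [pvRows, List.getElem?_append_right (by simp [pvRow]; omega)]
      have h1 : (q + 1) * 7 + r - (pvRow stack y).length = q * 7 + r := by
        simp [pvRow]; omega
      rw [h1, ih (y - 1) q r (by omega) hr]
      have : y - 1 - (q : Int) = y - ((q : Nat) + 1 : Int) := by ring
      simp only [this]
      push_cast
      ring_nf

theorem pvIte_singleton (c : Prop) [Decidable c] :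
    (if c then ['#'] else ['.']) = [if c then '#' else '.'] := by
  split <;> rfl

-- the inner x-loop of A renders one row
theorem pvLine_eq (stack : List (Int × Int)) (y : Int) (s : String) :
    ((PySem.List.pyRange 0 7 1).foldl (fun line x =>
      line ++ (if (x, y) ∈ stack then "#" else ".")) s).toList
    = s.toList ++ pvRow stack y := by
  rw [show PySem.List.pyRange 0 7 1 = [0,1,2,3,4,5,6] from by decide]
  simp only [List.foldl]
  simp [pvRow, apply_ite String.toList, pvIte_singleton]

-- the outer y-loop of A stacks the rows
theorem pvFold_eq (stack : List (Int × Int)) (n : Nat) :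
    ∀ (y : Int) (s : String),
    (((List.range n).map (fun (k : Nat) => y - (k : Int))).foldl (fun output y =>
      let line := (PySem.List.pyRange 0 7 1).foldl (fun line x =>
        line ++ (if (x, y) ∈ stack then "#" else ".")) ""
      output ++ line) s).toList
    = s.toList ++ pvRows stack y n := by
  induction n with
  | zero => intro y s; simp [pvRows]
  | succ n ih =>
    intro y s
    rw [List.range_succ_eq_map, List.map_cons, List.foldl_cons, List.map_map]
    have hmap : (List.range n).map ((fun (k : Nat) => y - (k : Int)) ∘ Nat.succ)
        = (List.range n).map (fun (k : Nat) => (y - 1) - (k : Int)) := by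
      apply List.map_congr_left; intro k _
      simp only [Function.comp]; push_cast; ring
    rw [hmap, ih (y - 1)]
    simp only [Nat.cast_zero, sub_zero]
    rw [show (pvRows stack y (n + 1)) = pvRow stack y ++ pvRows stack (y - 1) n from rfl]
    rw [String.toList_append, pvLine_eq]
    simp

theorem pvA_toList (miny maxy : Int) (stack : List (Int × Int)) :
    (visualise miny maxy stack).toList
    = pvRows stack maxy ((maxy - miny + 1).toNat) := by
  unfold visualise
  rw [PySem.List.pyRange_neg_one]
  have h : (maxy - (miny - 1)).toNat = (maxy - miny + 1).toNat := by omega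
  rw [h, pvFold_eq]
  rfl

-- the scatter write of B
def pvWrite (miny maxy : Int) (c : List Char) (p : Int × Int) : List Char :=
  if miny ≤ p.2 ∧ p.2 ≤ maxy ∧ 0 ≤ p.1 ∧ p.1 < 7 then
    c.set ((maxy - p.2) * 7 + p.1).toNat '#'
  else c

theorem pvWrite_length (miny maxy : Int) (c : List Char) (p : Int × Int) :
    (pvWrite miny maxy c p).length = c.length := by
  unfold pvWrite; split <;> simp

theorem pvScatter_length (miny maxy : Int) (st : List (Int × Int)) :
    ∀ (c : List Char), (st.foldl (pvWrite miny maxy) c).length = c.length := by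
  induction st with
  | nil => simp
  | cons p tl ih => intro c; rw [List.foldl_cons, ih, pvWrite_length]

theorem pvScatter_get (miny maxy : Int) (st : List (Int × Int)) :
    ∀ (c : List Char) (q r : Nat),
    c.length = ((maxy - miny + 1) * 7).toNat → r < 7 → q * 7 + r < c.length →
    (st.foldl (pvWrite miny maxy) c)[q * 7 + r]?
      = (if ((r : Int), maxy - (q : Int)) ∈ st then some '#' else getElem? c (q * 7 + r)) := by
  induction st with
  | nil => simp
  | cons p tl ih =>
    intro c q r hc hr hi
    rw [List.foldl_cons,
      ih (pvWrite miny maxy c p) q r (by rw [pvWrite_length]; exact hc)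
        hr (by rw [pvWrite_length]; exact hi)]
    by_cases hm : ((r : Int), maxy - (q : Int)) ∈ tl
    · simp [hm]
    · simp only [List.mem_cons, hm, or_false]
      by_cases hp : p = ((r : Int), maxy - (q : Int))
      · have hv : miny ≤ p.2 ∧ p.2 ≤ maxy ∧ 0 ≤ p.1 ∧ p.1 < 7 := by
          subst hp; simp only
          constructor
          · omega
          · refine ⟨by omega, by positivity, by exact_mod_cast hr⟩
        have hidx : ((maxy - p.2) * 7 + p.1).toNat = q * 7 + r := by
          subst hp; simp only; omega
        rw [pvWrite, if_pos hv, hidx]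
        simp [hp, List.getElem?_set_self (by omega : q * 7 + r < c.length)]
      · rw [if_neg (show ¬ (((r : Int), maxy - (q : Int)) = p) from fun h => hp h.symm)]
        simp only [if_false]
        unfold pvWrite
        split
        · rename_i hv
          obtain ⟨x, y⟩ := p
          apply List.getElem?_set_ne
          intro hEq
          apply hp
          simp only at hv hEq ⊢
          have hx : x = (r : Int) ∧ y = maxy - (q : Int) := by omega
          rw [hx.1, hx.2]
        · rfl

theorem pvB_toList (miny maxy : Int) (stack : List (Int × Int)) :
    (visualise_alt miny maxy stack).toList
    = stack.foldl (pvWrite miny maxy)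
        (List.replicate ((maxy - miny + 1) * 7).toNat '.') := by
  unfold visualise_alt pvWrite
  simp

theorem visualise_spec : Claim_equal_visualise := by
  intro miny maxy stack _
  unfold Spec_visualise
  apply String.toList_inj.mp
  rw [pvA_toList, pvB_toList]
  set h : Nat := (maxy - miny + 1).toNat with hh
  have hlen : ((maxy - miny + 1) * 7).toNat = h * 7 := by omega
  apply List.ext_getElem?
  intro i
  by_cases hi : i < h * 7
  · have hqr : i = (i / 7) * 7 + i % 7 := by omega
    rw [hqr, pvRows_get stack h maxy (i / 7) (i % 7) (by omega) (by omega),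
      pvScatter_get miny maxy stack _ (i / 7) (i % 7)
        (by simp [hlen]) (by omega) (by simp [hlen]; omega)]
    rw [List.getElem?_replicate]
    simp only [hlen]
    rw [if_pos (by omega : (i / 7) * 7 + i % 7 < h * 7)]
    split <;> rfl
  · rw [List.getElem?_eq_none (by rw [pvRows_length]; omega),
      List.getElem?_eq_none (by rw [pvScatter_length]; simp [hlen]; omega)]
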